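-- pv_equiv track=rewrite | github.com/sumalathareddy11/aiac | lab12/TASK2.py | build_hash_table
-- ===== SOURCE A (Python) =====
-- def build_hash_table(books, key='title'):
--     hash_table = {}
--     for book in books:
--         field = book[key].lower()
--         if field not in hash_table:
--             hash_table[field] = []
--         hash_table[field].append(book)
--     return hash_table
-- ===== SOURCE B (Python) =====
-- def build_hash_table(books, key='title'):
--     # Same grouping, different decomposition: ordered-deduplicate the lowered
--     # fields first, then one dict comprehension filtering books per field.
--     fields = list(dict.fromkeys(book[key].lower() for book in books))
--     return {f: [b for b in books if b[key].lower() == f] for f in fields}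
-- ===== Notes on version B (the rewrite author's own statement) =====
-- stated objective: alternative
-- what changed: Replaces the one-pass hash-insert loop by a two-phase decomposition: ordered dedup of the lowercased key fields (dict.fromkeys) followed by a dict comprehension that filters the books for each field.
import Mathlib
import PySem

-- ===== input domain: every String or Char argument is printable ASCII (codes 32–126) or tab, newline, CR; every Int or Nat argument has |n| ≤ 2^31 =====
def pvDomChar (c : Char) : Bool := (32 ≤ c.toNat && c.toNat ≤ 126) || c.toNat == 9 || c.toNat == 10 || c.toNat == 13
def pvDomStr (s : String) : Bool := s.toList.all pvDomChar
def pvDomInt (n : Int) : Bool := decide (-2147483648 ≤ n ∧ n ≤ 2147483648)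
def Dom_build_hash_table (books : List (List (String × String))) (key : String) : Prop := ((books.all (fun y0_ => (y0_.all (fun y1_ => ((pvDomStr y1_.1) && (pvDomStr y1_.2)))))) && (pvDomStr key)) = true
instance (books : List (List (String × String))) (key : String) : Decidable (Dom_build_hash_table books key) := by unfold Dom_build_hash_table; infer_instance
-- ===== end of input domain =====

-- ===== PORT A =====
-- B differs from A only in decomposition (dedup-then-filter vs one-pass dict insert); not faster.
-- book[key]: Python dict lookup; total here via getD "" — Pre_ keeps exactly the inputs where the key is present (no KeyError).
def pvKeyOf (key : String) (book : List (String × String)) : String :=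
  PySem.Str.lower ((PySem.Dict.mk book).getD key "")

def build_hash_table (books : List (List (String × String))) (key : String) : List (String × List (List (String × String))) :=
  (books.foldl (fun ht book =>
      let field := pvKeyOf key book
      let ht := if ht.contains field then ht else ht.insert field []
      ht.modify field [] (fun l => l ++ [book]))
    PySem.Dict.empty).items

-- ===== PORT B =====
def build_hash_table_alt (books : List (List (String × String))) (key : String) : List (String × List (List (String × String))) :=
  (PySem.List.dedup (books.map (pvKeyOf key))).map
    (fun f => (f, books.filter (fun b => pvKeyOf key b == f)))

-- ===== PRECONDITION & SPEC =====
-- Pre_: every book contains the key (otherwise Python A raises KeyError).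
def Pre_build_hash_table (books : List (List (String × String))) (key : String) : Prop :=
  (books.all (fun b => b.any (fun p => p.1 == key))) = true
instance (books : List (List (String × String))) (key : String) : Decidable (Pre_build_hash_table books key) := by unfold Pre_build_hash_table; infer_instance
def pvWitness_build_hash_table : (List (List (String × String))) × String :=
  ([[("title", "Dune")], [("title", "dune"), ("year", "1965")]], "title")
def Spec_build_hash_table (books : List (List (String × String))) (key : String) (out : List (String × List (List (String × String)))) : Prop := out = build_hash_table_alt books key
instance (books : List (List (String × String))) (key : String) (out : List (String × List (List (String × String)))) : Decidable (Spec_build_hash_table books key out) := by unfold Spec_build_hash_table; infer_instance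

-- ===== CLAIM (what is proved, stated in full; the proofs are below) =====
def Claim_equal_build_hash_table : Prop := ∀ (books : List (List (String × String))) (key : String), Dom_build_hash_table books key → Pre_build_hash_table books key → Spec_build_hash_table books key (build_hash_table books key)

-- ===== LEMMAS AND PROOFS =====
theorem pv_step_eq {κ : Type} [BEq κ] [LawfulBEq κ] {β : Type} (d : PySem.Dict κ (List β)) (f : κ) (b : β) :
    (if d.contains f then d else d.insert f []).modify f [] (fun l => l ++ [b])
      = d.modify f [] (fun l => l ++ [b]) := by
  by_cases h : d.contains f
  · rw [if_pos h]
  · rw [if_neg h]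
    simp only [PySem.Dict.modify, PySem.Dict.getD_insert_self, PySem.Dict.insert_insert_self,
      PySem.Dict.getD_of_not_contains _ _ (Bool.not_eq_true _ ▸ h)]

theorem pv_A_eq (books : List (List (String × String))) (key : String) :
    build_hash_table books key
      = (PySem.Set.ofList (books.map (pvKeyOf key))).map
          (fun f => (f, books.filter (fun b => pvKeyOf key b == f))) := by
  unfold build_hash_table
  have hstep : (books.foldl (fun ht book =>
      let field := pvKeyOf key book
      let ht := if ht.contains field then ht else ht.insert field []
      ht.modify field [] (fun l => l ++ [book])) PySem.Dict.empty)
      = books.foldl (fun ht book => ht.modify (pvKeyOf key book) [] (fun l => l ++ [book])) PySem.Dict.empty := by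
    apply congrArg (fun g => List.foldl g PySem.Dict.empty books)
    funext d b
    exact pv_step_eq d (pvKeyOf key b) b
  rw [hstep]
  have hnodup : (books.foldl (fun ht book => ht.modify (pvKeyOf key book) [] (fun l => l ++ [book])) PySem.Dict.empty).keys.Nodup := by
    exact PySem.Dict.nodup_keys_foldl_modify_key books (pvKeyOf key) [] (fun _ b => fun l => l ++ [b]) PySem.Dict.empty (by simp [PySem.Dict.keys_empty])
  rw [PySem.Dict.items_eq_map_keys _ hnodup []]
  have hkeys : (books.foldl (fun ht book => ht.modify (pvKeyOf key book) [] (fun l => l ++ [book])) PySem.Dict.empty).keys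
      = PySem.Set.ofList (books.map (pvKeyOf key)) := by
    rw [PySem.Dict.keys_foldl_modify_key books (pvKeyOf key) [] (fun _ b => fun l => l ++ [b]) PySem.Dict.empty,
      PySem.Dict.keys_empty, PySem.Set.update_nil_left]
  rw [hkeys]
  apply List.map_congr_left
  intro f _
  have hfold : books.foldl (fun ht book => ht.modify (pvKeyOf key book) [] (fun l => l ++ [book])) PySem.Dict.empty
      = (books.map (fun b => (pvKeyOf key b, b))).foldl (fun d p => d.modify p.1 [] (fun l => l ++ [p.2])) PySem.Dict.empty := by
    rw [List.foldl_map]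
  rw [hfold, PySem.Dict.getD_foldl_modify_append, PySem.Dict.getD_empty, List.filter_map]
  simp [Function.comp_def, List.map_map]

theorem pv_B_eq (books : List (List (String × String))) (key : String) :
    build_hash_table_alt books key
      = (PySem.Set.ofList (books.map (pvKeyOf key))).map
          (fun f => (f, books.filter (fun b => pvKeyOf key b == f))) := rfl

-- ===== VERDICT (by name: the statement is the Claim_ definition above) =====
theorem build_hash_table_spec : Claim_equal_build_hash_table := by
  intro books key _ _
  unfold Spec_build_hash_table
  rw [pv_A_eq, pv_B_eq]
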